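-- pv_equiv track=rewrite | github.com/ICEI-PUC-Minas-EC-TCC/pmg-ec-2025-2-tcc2-linspector | linspector.py | extract_signal_value
-- ===== SOURCE A (Python) =====
-- def extract_signal_value(
--     data_bytes,
--     start_bit,
--     length,
--     is_big_endian,
--     is_signed,
--     signal_name_for_log="UnknownSignal",
--     frame_id_for_log="UnknownFrame"
-- ):
--     extracted_value = 0
--     if is_big_endian:
--         for i in range(length):
--             bit_index = 8 * (start_bit // 8) + (7 - (start_bit % 8)) + i
--             byte_index = bit_index // 8
--             bit_in_byte = bit_index % 8
--             bit_value = (data_bytes[byte_index] >> (7 - bit_in_byte)) & 1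
--             extracted_value = (extracted_value << 1) | bit_value
--     else:
--         raw_value_combined = 0
--         for idx, byte in enumerate(data_bytes):
--             raw_value_combined |= (byte & 0xFF) << (8 * idx)
--         mask = (1 << length) - 1
--         extracted_value = (raw_value_combined >> start_bit) & mask
--     if is_signed and length > 0:
--         sign_bit_mask = 1 << (length - 1)
--         if (extracted_value & sign_bit_mask):
--             extracted_value -= (1 << length)
--     return extracted_value
-- ===== SOURCE B (Python) =====
-- def extract_signal_value(
--     data_bytes,
--     start_bit,
--     length,
--     is_big_endian,
--     is_signed,
--     signal_name_for_log="UnknownSignal",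
--     frame_id_for_log="UnknownFrame"
-- ):
--     frame = bytes(b & 0xFF for b in data_bytes)
--     mask = (1 << length) - 1
--     if is_big_endian:
--         msb_start = 8 * (start_bit // 8) + 7 - start_bit % 8
--         shift = 8 * len(frame) - msb_start - length
--         value = (int.from_bytes(frame, 'big') >> shift) & mask
--     else:
--         value = (int.from_bytes(frame, 'little') >> start_bit) & mask
--     if is_signed and length > 0 and (value >> (length - 1)):
--         value -= 1 << length
--     return value
-- ===== Notes on version B (the rewrite author's own statement) =====
-- stated objective: faster
-- what changed: Replaces A's per-bit MSB-first accumulation loop (big-endian) and per-byte OR loop (little-endian) by one int.from_bytes conversion plus a single closed-form shift-and-mask.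
-- outside the precondition, e.g. on extract_signal_value([171], -8, 1, True, False, 'UnknownSignal', 'UnknownFrame'): A returns 1, B returns 0; on extract_signal_value([1], 100, 0, True, False, 'UnknownSignal', 'UnknownFrame'): A returns 0, B raises ValueError; on extract_signal_value([1], 0, -3, True, False, 'UnknownSignal', 'UnknownFrame'): A returns 0, B raises ValueError
import Mathlib
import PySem

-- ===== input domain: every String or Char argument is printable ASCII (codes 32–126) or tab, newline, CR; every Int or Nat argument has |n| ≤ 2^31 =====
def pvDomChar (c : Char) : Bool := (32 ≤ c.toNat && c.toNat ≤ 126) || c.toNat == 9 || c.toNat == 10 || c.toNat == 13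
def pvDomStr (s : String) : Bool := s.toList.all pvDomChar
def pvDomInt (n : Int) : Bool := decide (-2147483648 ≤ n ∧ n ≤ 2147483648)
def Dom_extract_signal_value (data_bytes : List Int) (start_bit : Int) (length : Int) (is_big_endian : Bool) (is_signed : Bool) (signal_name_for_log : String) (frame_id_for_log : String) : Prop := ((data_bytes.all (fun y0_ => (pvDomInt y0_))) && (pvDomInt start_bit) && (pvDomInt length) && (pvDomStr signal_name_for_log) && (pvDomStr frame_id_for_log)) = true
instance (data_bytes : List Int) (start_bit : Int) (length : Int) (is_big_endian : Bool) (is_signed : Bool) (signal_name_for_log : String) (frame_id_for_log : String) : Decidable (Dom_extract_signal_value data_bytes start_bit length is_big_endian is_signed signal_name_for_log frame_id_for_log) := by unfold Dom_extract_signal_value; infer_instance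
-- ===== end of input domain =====

-- B replaces A's per-bit (big-endian) / per-byte OR (little-endian) accumulation loops by one
-- int.from_bytes-style frame integer and a single closed-form shift-and-mask (objective: faster
-- in Python via C-level int.from_bytes; return value only, no argument is mutated).

-- ===== PORT A =====
def extract_signal_value (data_bytes : List Int) (start_bit : Int) (length : Int) (is_big_endian : Bool) (is_signed : Bool) (signal_name_for_log : String) (frame_id_for_log : String) : Int :=
  let extracted_value : Int :=
    if is_big_endian then
      -- for i in range(length): MSB-first bit accumulation
      (PySem.List.pyRange 0 length 1).foldl (fun extracted_value i =>
        let bit_index := 8 * PySem.Int.floordiv start_bit 8 + (7 - PySem.Int.mod start_bit 8) + i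
        let byte_index := PySem.Int.floordiv bit_index 8
        let bit_in_byte := PySem.Int.mod bit_index 8
        -- data_bytes[byte_index] ported with pyGetD; the default is never read inside Pre_
        let bit_value := PySem.Int.band (PySem.List.pyGetD data_bytes byte_index 0 >>> ((7 - bit_in_byte).toNat : Nat)) 1
        PySem.Int.bor (extracted_value <<< (1 : Nat)) bit_value) 0
    else
      let raw_value_combined := (PySem.List.enumerate data_bytes).foldl
        (fun raw p => PySem.Int.bor raw (PySem.Int.band p.2 255 <<< ((8 * p.1).toNat : Nat))) 0
      let mask := (1 : Int) <<< (length.toNat : Nat) - 1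
      PySem.Int.band (raw_value_combined >>> (start_bit.toNat : Nat)) mask
  if is_signed && decide (0 < length) then
    let sign_bit_mask := (1 : Int) <<< ((length - 1).toNat : Nat)
    if PySem.Int.band extracted_value sign_bit_mask ≠ 0 then
      extracted_value - (1 : Int) <<< (length.toNat : Nat)
    else extracted_value
  else extracted_value

-- ===== PORT B =====
-- int.from_bytes(frame, 'big') / int.from_bytes(frame, 'little') as the standard folds
def pvIntFromBytesBE (bs : List Int) : Int := bs.foldl (fun acc b => 256 * acc + b) 0
def pvIntFromBytesLE (bs : List Int) : Int := bs.foldr (fun b acc => b + 256 * acc) 0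

def extract_signal_value_alt (data_bytes : List Int) (start_bit : Int) (length : Int) (is_big_endian : Bool) (is_signed : Bool) (signal_name_for_log : String) (frame_id_for_log : String) : Int :=
  let frame := data_bytes.map (fun b => PySem.Int.band b 255)
  let mask := (1 : Int) <<< (length.toNat : Nat) - 1
  let value :=
    if is_big_endian then
      let msb_start := 8 * PySem.Int.floordiv start_bit 8 + 7 - PySem.Int.mod start_bit 8
      let shift := 8 * (frame.length : Int) - msb_start - length
      PySem.Int.band (pvIntFromBytesBE frame >>> (shift.toNat : Nat)) mask
    else
      PySem.Int.band (pvIntFromBytesLE frame >>> (start_bit.toNat : Nat)) mask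
  if is_signed && decide (0 < length) && decide (value >>> ((length - 1).toNat : Nat) ≠ 0) then
    value - (1 : Int) <<< (length.toNat : Nat)
  else value

-- ===== PRECONDITION & SPEC =====
-- Pre_ keeps the natural domain: a non-negative bit position and field width, and (big-endian)
-- a field that lies inside the byte buffer.  Excluded inputs on which A still returns a value:
-- negative start_bit / negative length and big-endian overruns with length = 0, where A returns
-- an accidental value (negative-index wraparound resp. 0 from an empty loop) and the natural B
-- raises ValueError on the negative shift or returns the zero-extended read.
def Pre_extract_signal_value (data_bytes : List Int) (start_bit : Int) (length : Int) (is_big_endian : Bool) (is_signed : Bool) (signal_name_for_log : String) (frame_id_for_log : String) : Prop :=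
  0 ≤ start_bit ∧ 0 ≤ length ∧
    (is_big_endian = true →
      8 * PySem.Int.floordiv start_bit 8 + (7 - PySem.Int.mod start_bit 8) + length ≤ 8 * data_bytes.length)
instance (data_bytes : List Int) (start_bit : Int) (length : Int) (is_big_endian : Bool) (is_signed : Bool) (signal_name_for_log : String) (frame_id_for_log : String) : Decidable (Pre_extract_signal_value data_bytes start_bit length is_big_endian is_signed signal_name_for_log frame_id_for_log) := by unfold Pre_extract_signal_value; infer_instance

def pvWitness_extract_signal_value : List Int × Int × Int × Bool × Bool × String × String :=
  ([170, 5], 3, 7, true, true, "sig", "frame")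

def Spec_extract_signal_value (data_bytes : List Int) (start_bit : Int) (length : Int) (is_big_endian : Bool) (is_signed : Bool) (signal_name_for_log : String) (frame_id_for_log : String) (out : Int) : Prop := out = extract_signal_value_alt data_bytes start_bit length is_big_endian is_signed signal_name_for_log frame_id_for_log
instance (data_bytes : List Int) (start_bit : Int) (length : Int) (is_big_endian : Bool) (is_signed : Bool) (signal_name_for_log : String) (frame_id_for_log : String) (out : Int) : Decidable (Spec_extract_signal_value data_bytes start_bit length is_big_endian is_signed signal_name_for_log frame_id_for_log out) := by unfold Spec_extract_signal_value; infer_instance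

-- ===== CLAIM (what is proved, stated in full; the proofs are below) =====
def Claim_equal_extract_signal_value : Prop := ∀ (data_bytes : List Int) (start_bit : Int) (length : Int) (is_big_endian : Bool) (is_signed : Bool) (signal_name_for_log : String) (frame_id_for_log : String), Dom_extract_signal_value data_bytes start_bit length is_big_endian is_signed signal_name_for_log frame_id_for_log → Pre_extract_signal_value data_bytes start_bit length is_big_endian is_signed signal_name_for_log frame_id_for_log → Spec_extract_signal_value data_bytes start_bit length is_big_endian is_signed signal_name_for_log frame_id_for_log (extract_signal_value data_bytes start_bit length is_big_endian is_signed signal_name_for_log frame_id_for_log)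

-- ===== LEMMAS AND PROOFS =====

-- the byte list as masked naturals, and the two frame integers on the Nat side
def pvBytes (data_bytes : List Int) : List Nat := data_bytes.map (fun b => (PySem.Int.mod b 256).toNat)
def pvBE (fs : List Nat) : Nat := fs.foldl (fun a f => a * 256 + f) 0
def pvLE (fs : List Nat) : Nat := fs.foldr (fun f a => f + 256 * a) 0
def pvBit (fs : List Nat) (j : Nat) : Nat := fs.getD (j / 8) 0 / 2 ^ (7 - j % 8) % 2

lemma pv_band255 (x : Int) : PySem.Int.band x 255 = PySem.Int.mod x 256 := by
  rw [PySem.Int.mod_eq_emod_of_pos (by norm_num)]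
  by_cases hx : 0 ≤ x
  · rw [PySem.Int.band_of_nonneg hx (by norm_num)]
    rw [show ((255:Int)).toNat = 2 ^ 8 - 1 from rfl, Nat.and_two_pow_sub_one_eq_mod]
    omega
  · unfold PySem.Int.band
    rw [if_neg (by omega), if_pos (by norm_num)]
    rw [show ((255:Int)).toNat = 255 from rfl, Nat.land_comm,
      show (255:Nat) = 2 ^ 8 - 1 from rfl, Nat.and_two_pow_sub_one_eq_mod]
    omega

lemma pv_lor_disj (m k a : Nat) (h : a < 2 ^ k) : m * 2 ^ k ||| a = m * 2 ^ k + a := by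
  induction k generalizing m a with
  | zero => interval_cases a; simp
  | succ k ih =>
    have ha2 : a / 2 < 2 ^ k := by
      have : (2:Nat) ^ (k+1) = 2 ^ k * 2 := by ring
      omega
    have hbit : a = Nat.bit (decide (a % 2 = 1)) (a / 2) := by
      rw [Nat.bit_val]
      rcases Nat.mod_two_eq_zero_or_one a with h2 | h2 <;> (simp [h2]; omega)
    have hm : m * 2 ^ (k + 1) = Nat.bit false (m * 2 ^ k) := by
      rw [Nat.bit_val]; simp; ring
    rw [hm, hbit, Nat.lor_bit, ih m (a / 2) ha2, Nat.bit_val, Nat.bit_val]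
    rcases Nat.mod_two_eq_zero_or_one a with h2 | h2 <;> simp [h2] <;> omega

lemma pv_bit_mod256 (X t : Nat) (ht : t < 8) : X / 2 ^ t % 2 = X % 256 / 2 ^ t % 2 := by
  have h1 : X = X % 256 + (X / 256 * 2 ^ (8 - t)) * 2 ^ t := by
    have h2 : (2:Nat) ^ (8 - t) * 2 ^ t = 256 := by
      rw [← pow_add, show 8 - t + t = 8 by omega]; norm_num
    have h2' : X % 256 + X / 256 * 2 ^ (8 - t) * 2 ^ t = X % 256 + X / 256 * 256 := by
      rw [mul_assoc, h2]
    omega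
  conv_lhs => rw [h1]
  rw [Nat.add_mul_div_right _ _ (by positivity : 0 < 2 ^ t)]
  have h3 : X / 256 * 2 ^ (8 - t) = (X / 256 * 2 ^ (7 - t)) * 2 := by
    rw [mul_assoc, ← pow_succ, show 7 - t + 1 = 8 - t by omega]
  rw [h3, Nat.add_mul_mod_self_right]

lemma pv_step_arith (V e m : Nat) :
    V / 2 ^ e % 2 ^ (m + 1) = 2 * (V / 2 ^ (e + 1) % 2 ^ m) + V / 2 ^ e % 2 := by
  have hq : V / 2 ^ (e + 1) = V / 2 ^ e / 2 := by
    rw [Nat.div_div_eq_div_mul, ← pow_succ]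
  rw [hq]
  set q := V / 2 ^ e with hqdef
  have hd := Nat.div_add_mod (q / 2) (2 ^ m)
  have h1 : q = (2 * (q / 2 % 2 ^ m) + q % 2) + (q / 2 / 2 ^ m) * (2 ^ m * 2) := by
    nlinarith [Nat.div_add_mod q 2, hd]
  rw [pow_succ]
  conv_lhs => rw [h1]
  rw [Nat.add_mul_mod_self_right, Nat.mod_eq_of_lt]
  have := Nat.mod_lt (q / 2) (show 0 < 2 ^ m by positivity)
  omega

lemma pv_bytes_lt (data_bytes : List Int) : ∀ f ∈ pvBytes data_bytes, f < 256 := by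
  intro f hf
  simp only [pvBytes, List.mem_map] at hf
  obtain ⟨b, _, rfl⟩ := hf
  have h1 := PySem.Int.mod_nonneg b (show (0:Int) < 256 by norm_num)
  have h2 := PySem.Int.mod_lt b (show (0:Int) < 256 by norm_num)
  omega

lemma pv_be_acc (fs : List Nat) : ∀ a : Nat, fs.foldl (fun x f => x * 256 + f) a = a * 256 ^ fs.length + pvBE fs := by
  induction fs with
  | nil => intro a; simp [pvBE]
  | cons f fs ih =>
    intro a
    simp only [List.foldl_cons, List.length_cons]
    rw [ih (a * 256 + f), show pvBE (f :: fs) = fs.foldl (fun x f => x * 256 + f) f by simp [pvBE], ih f]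
    ring

lemma pv_be_cons (f : Nat) (fs : List Nat) : pvBE (f :: fs) = f * 256 ^ fs.length + pvBE fs := by
  rw [show pvBE (f :: fs) = fs.foldl (fun x f => x * 256 + f) f by simp [pvBE], pv_be_acc fs f]

lemma pv_be_lt (fs : List Nat) (hb : ∀ f ∈ fs, f < 256) : pvBE fs < 256 ^ fs.length := by
  induction fs with
  | nil => simp [pvBE]
  | cons f fs ih =>
    have hf : f < 256 := hb f List.mem_cons_self
    have h2 := ih (fun x hx => hb x (List.mem_cons_of_mem _ hx))
    rw [pv_be_cons, List.length_cons, pow_succ]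
    nlinarith

lemma pv_byte_extract (fs : List Nat) : ∀ k, (∀ f ∈ fs, f < 256) → k < fs.length →
    pvBE fs / 256 ^ (fs.length - 1 - k) % 256 = fs.getD k 0 := by
  induction fs with
  | nil => intro k _ hk; simp at hk
  | cons f fs ih =>
    intro k hb hk
    have hbf : ∀ x ∈ fs, x < 256 := fun x hx => hb x (List.mem_cons_of_mem _ hx)
    rw [pv_be_cons]
    cases k with
    | zero =>
      have hlt := pv_be_lt fs hbf
      have hf : f < 256 := hb f List.mem_cons_self
      simp only [List.length_cons, List.getD_cons_zero, Nat.add_sub_cancel, Nat.sub_zero]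
      rw [Nat.add_comm, Nat.add_mul_div_right _ _ (by positivity : 0 < 256 ^ fs.length)]
      rw [Nat.div_eq_of_lt hlt, Nat.zero_add, Nat.mod_eq_of_lt hf]
    | succ k =>
      have hk' : k < fs.length := by simpa using hk
      have he : (f :: fs).length - 1 - (k + 1) = fs.length - 1 - k := by simp; omega
      rw [he]
      have hsplit : (256:Nat) ^ fs.length = 256 ^ (k + 1) * 256 ^ (fs.length - 1 - k) := by
        rw [← pow_add]; congr 1; omega
      have h1 : f * 256 ^ fs.length + pvBE fs = pvBE fs + (f * 256 ^ (k + 1)) * 256 ^ (fs.length - 1 - k) := by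
        rw [hsplit]; ring
      rw [h1, Nat.add_mul_div_right _ _ (by positivity : 0 < 256 ^ (fs.length - 1 - k))]
      have h2 : f * 256 ^ (k + 1) = (f * 256 ^ k) * 256 := by ring
      rw [h2, Nat.add_mul_mod_self_right, ih k hbf hk', List.getD_cons_succ]

lemma pv_bit_extract (fs : List Nat) (j : Nat) (hb : ∀ f ∈ fs, f < 256) (hj : j < 8 * fs.length) :
    pvBE fs / 2 ^ (8 * fs.length - 1 - j) % 2 = pvBit fs j := by
  have hk : j / 8 < fs.length := by omega
  have hr : j % 8 < 8 := Nat.mod_lt _ (by norm_num)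
  have he : 8 * fs.length - 1 - j = 8 * (fs.length - 1 - j / 8) + (7 - j % 8) := by
    have := Nat.div_add_mod j 8; omega
  rw [he, pow_add, ← Nat.div_div_eq_div_mul]
  have h256 : (2:Nat) ^ (8 * (fs.length - 1 - j / 8)) = 256 ^ (fs.length - 1 - j / 8) := by
    rw [show (256:Nat) = 2 ^ 8 by norm_num, ← pow_mul]
  rw [h256, pv_bit_mod256 _ _ (by omega), pv_byte_extract fs (j / 8) hb hk]
  rfl

lemma pv_bigLoop (fs : List Nat) (s : Nat) (hb : ∀ f ∈ fs, f < 256) :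
    ∀ m, s + m ≤ 8 * fs.length →
      (List.range m).foldl (fun acc i => 2 * acc + pvBit fs (s + i)) 0
        = pvBE fs / 2 ^ (8 * fs.length - (s + m)) % 2 ^ m := by
  intro m
  induction m with
  | zero => intro _; simp [Nat.mod_one]
  | succ m ih =>
    intro hm
    rw [List.range_succ, List.foldl_append, List.foldl_cons, List.foldl_nil,
      ih (by omega)]
    have he : 8 * fs.length - (s + (m + 1)) + 1 = 8 * fs.length - (s + m) := by omega
    rw [pv_step_arith (pvBE fs) (8 * fs.length - (s + (m + 1))) m, he]
    have hbit : pvBE fs / 2 ^ (8 * fs.length - (s + (m + 1))) % 2 = pvBit fs (s + m) := by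
      rw [show 8 * fs.length - (s + (m + 1)) = 8 * fs.length - 1 - (s + m) by omega]
      exact pv_bit_extract fs (s + m) hb (by omega)
    rw [hbit]

lemma pv_intBit (x : Int) (t : Nat) (ht : t < 8) :
    PySem.Int.mod (x >>> t) 2 = ((PySem.Int.mod x 256).toNat / 2 ^ t % 2 : Nat) := by
  rw [Int.shiftRight_eq_div_pow, PySem.Int.mod_eq_emod_of_pos (show (0:Int) < 2 by norm_num),
    PySem.Int.mod_eq_emod_of_pos (show (0:Int) < 256 by norm_num)]
  have hr0 : 0 ≤ x % 256 := Int.emod_nonneg x (by norm_num)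
  have hr1 : x % 256 < 256 := Int.emod_lt_of_pos x (by norm_num)
  have h256 : ((2:Int) ^ (8 - t)) * 2 ^ t = 256 := by
    rw [← pow_add, show 8 - t + t = 8 by omega]; norm_num
  have hx : x = x % 256 + (x / 256 * 2 ^ (8 - t)) * 2 ^ t := by
    rw [mul_assoc, h256]
    have := Int.mul_ediv_add_emod x 256
    omega
  conv_lhs => rw [hx]
  push_cast
  rw [Int.add_mul_ediv_right _ _ (by positivity : ((2:Int) ^ t) ≠ 0)]
  have h8t : (x / 256 * 2 ^ (8 - t)) = (x / 256 * 2 ^ (7 - t)) * 2 := by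
    rw [mul_assoc, ← pow_succ, show 7 - t + 1 = 8 - t by omega]
  rw [h8t, Int.add_mul_emod_self_right]
  have hcast : x % 256 = ((x % 256).toNat : Int) := by omega
  rw [hcast]
  norm_cast

lemma pv_littleA (data_bytes : List Int) : ∀ (s a : Nat), a < 2 ^ (8 * s) →
    (PySem.List.enumerate data_bytes (s : Int)).foldl
        (fun raw p => PySem.Int.bor raw (PySem.Int.band p.2 255 <<< ((8 * p.1).toNat : Nat))) (a : Int)
      = ((a + 2 ^ (8 * s) * pvLE (pvBytes data_bytes) : Nat) : Int) := by
  induction data_bytes with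
  | nil => intro s a ha; simp [PySem.List.enumerate_nil, pvBytes, pvLE]
  | cons x db ih =>
    intro s a ha
    rw [PySem.List.enumerate_cons, List.foldl_cons]
    dsimp only
    have hf0 := PySem.Int.mod_nonneg x (show (0:Int) < 256 by norm_num)
    have hf1 := PySem.Int.mod_lt x (show (0:Int) < 256 by norm_num)
    have hstep : PySem.Int.bor (a : Int) (PySem.Int.band x 255 <<< (8 * (s:Int)).toNat)
        = ((a + (PySem.Int.mod x 256).toNat * 2 ^ (8 * s) : Nat) : Int) := by
      have hfx : PySem.Int.band x 255 = (((PySem.Int.mod x 256).toNat : Nat) : Int) := by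
        rw [pv_band255]; omega
      rw [hfx, show (8 * (s:Int)).toNat = 8 * s by omega, ← Int.natCast_shiftLeft,
        PySem.Int.bor_natCast, Nat.shiftLeft_eq, Nat.lor_comm,
        pv_lor_disj _ (8*s) a ha]
      push_cast
      ring
    rw [hstep, show ((s:Int) + 1) = ((s+1 : Nat) : Int) by push_cast; ring]
    have h1 : (2:Nat) ^ (8 * (s+1)) = 2 ^ (8*s) * 256 := by
      rw [show 8*(s+1) = 8*s + 8 by ring, pow_add]; norm_num
    have ha' : a + (PySem.Int.mod x 256).toNat * 2 ^ (8 * s) < 2 ^ (8 * (s+1)) := by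
      have ht : (PySem.Int.mod x 256).toNat ≤ 255 := by omega
      have hp : (PySem.Int.mod x 256).toNat * 2 ^ (8*s) ≤ 255 * 2 ^ (8*s) :=
        Nat.mul_le_mul_right _ ht
      rw [h1]; omega
    rw [ih (s+1) _ ha']
    have hle : pvLE (pvBytes (x :: db)) = (PySem.Int.mod x 256).toNat + 256 * pvLE (pvBytes db) := by
      simp [pvBytes, pvLE]
    rw [hle]
    norm_cast
    rw [h1]; ring

lemma pv_beB_aux (data_bytes : List Int) : ∀ acc : Nat,
    (data_bytes.map (fun b => PySem.Int.band b 255)).foldl (fun acc b => 256 * acc + b) (acc : Int)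
      = ((pvBytes data_bytes).foldl (fun a f => a * 256 + f) acc : Nat) := by
  induction data_bytes with
  | nil => intro acc; simp [pvBytes]
  | cons x db ih =>
    intro acc
    have hf0 := PySem.Int.mod_nonneg x (show (0:Int) < 256 by norm_num)
    simp only [List.map_cons, List.foldl_cons, pvBytes] at ih ⊢
    rw [pv_band255, show (256:Int) * acc + PySem.Int.mod x 256
        = ((acc * 256 + (PySem.Int.mod x 256).toNat : Nat) : Int) by push_cast; omega]
    exact ih _

lemma pv_beB (data_bytes : List Int) :
    pvIntFromBytesBE (data_bytes.map (fun b => PySem.Int.band b 255)) = (pvBE (pvBytes data_bytes) : Int) := by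
  have h := pv_beB_aux data_bytes 0
  simpa [pvIntFromBytesBE, pvBE] using h

lemma pv_leB (data_bytes : List Int) :
    pvIntFromBytesLE (data_bytes.map (fun b => PySem.Int.band b 255)) = (pvLE (pvBytes data_bytes) : Int) := by
  induction data_bytes with
  | nil => simp [pvIntFromBytesLE, pvBytes, pvLE]
  | cons x db ih =>
    have hf0 := PySem.Int.mod_nonneg x (show (0:Int) < 256 by norm_num)
    simp only [pvIntFromBytesLE, List.map_cons, List.foldr_cons] at ih ⊢
    rw [ih, pv_band255]
    have hle : pvLE (pvBytes (x :: db)) = (PySem.Int.mod x 256).toNat + 256 * pvLE (pvBytes db) := by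
      simp [pvBytes, pvLE]
    rw [hle]
    push_cast
    omega

lemma pv_signTest (w L : Nat) (hw : w < 2 ^ L) (hL : 1 ≤ L) :
    (PySem.Int.band (w : Int) ((1 : Int) <<< (L - 1 : Nat)) ≠ 0 ↔ ((w : Int) >>> (L - 1 : Nat)) ≠ 0) := by
  have h1 : ((1:Int) <<< (L - 1 : Nat)) = ((2 ^ (L-1) : Nat) : Int) := by
    rw [show (1:Int) = ((1:Nat):Int) from rfl, ← Int.natCast_shiftLeft, Nat.one_shiftLeft]
  rw [h1, PySem.Int.band_natCast, ← Int.natCast_shiftRight,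
    Nat.and_two_pow, Nat.shiftRight_eq_div_pow, Nat.testBit_eq_decide_div_mod_eq]
  have hdiv : w / 2 ^ (L - 1) < 2 := by
    have h2 : (2:Nat) ^ L = 2 ^ (L-1) * 2 := by
      rw [← pow_succ]; congr 1; omega
    exact Nat.div_lt_of_lt_mul (by omega)
  interval_cases h : w / 2 ^ (L - 1) <;> simp

lemma pv_maskShift (W sh L : Nat) :
    PySem.Int.band ((W : Int) >>> sh) ((1 : Int) <<< L - 1) = ((W / 2 ^ sh % 2 ^ L : Nat) : Int) := by
  have h1 : (1:Int) <<< L - 1 = ((2 ^ L - 1 : Nat) : Int) := by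
    rw [show (1:Int) = ((1:Nat):Int) from rfl, ← Int.natCast_shiftLeft, Nat.one_shiftLeft]
    have h2 : (1:Nat) ≤ 2 ^ L := Nat.one_le_two_pow
    push_cast [h2]
    ring
  rw [h1, ← Int.natCast_shiftRight, PySem.Int.band_natCast,
    Nat.and_two_pow_sub_one_eq_mod, Nat.shiftRight_eq_div_pow]

lemma pv_bigA_step (db : List Int) (J A : Nat) (hJ : J < 8 * db.length) :
    PySem.Int.bor (((A : Nat) : Int) <<< (1 : Nat))
      (PySem.Int.band (PySem.List.pyGetD db (PySem.Int.floordiv ((J : Nat) : Int) 8) 0 >>>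
        (((7 - PySem.Int.mod ((J : Nat) : Int) 8).toNat : Nat))) 1)
    = ((2 * A + pvBit (pvBytes db) J : Nat) : Int) := by
  have hdiv : PySem.Int.floordiv (J : Int) 8 = ((J / 8 : Nat) : Int) := by
    exact_mod_cast PySem.Int.floordiv_natCast J 8
  have hmod : PySem.Int.mod (J : Int) 8 = ((J % 8 : Nat) : Int) := by
    exact_mod_cast PySem.Int.mod_natCast J 8
  have hmod8 : J % 8 < 8 := Nat.mod_lt _ (by norm_num)
  have hk : J / 8 < db.length := by omega
  have htn : ((7 - PySem.Int.mod (J:Int) 8).toNat : Nat) = 7 - J % 8 := by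
    rw [hmod]; omega
  rw [hdiv, htn, PySem.List.pyGetD_eq_getElem db 0 (by positivity) (by exact_mod_cast hk)]
  simp only [Int.toNat_natCast]
  rw [PySem.Int.band_one, pv_intBit _ _ (by omega)]
  rw [show ((A:Nat):Int) <<< (1:Nat) = ((A <<< 1 : Nat) : Int) from (Int.natCast_shiftLeft A 1).symm,
    PySem.Int.bor_natCast]
  have hbit2 : (PySem.Int.mod (db[J / 8]'hk) 256).toNat / 2 ^ (7 - J % 8) % 2 < 2 :=
    Nat.mod_lt _ (by norm_num)
  rw [Nat.shiftLeft_eq, pv_lor_disj A 1 _ hbit2]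
  have hgd : (pvBytes db).getD (J / 8) 0 = (PySem.Int.mod (db[J / 8]'hk) 256).toNat := by
    rw [List.getD_eq_getElem _ _ (by simpa [pvBytes] using hk)]
    simp [pvBytes]
  have h21 : (2:Nat) ^ 1 = 2 := rfl
  rw [pvBit, hgd, h21]
  congr 1
  omega

lemma pv_bigA (db : List Int) (sbN : Nat) :
    ∀ m : Nat, 8 * (sbN / 8) + (7 - sbN % 8) + m ≤ 8 * db.length →
      (List.range m).foldl (fun extracted_value i =>
        let bit_index := 8 * PySem.Int.floordiv ((sbN : Nat) : Int) 8 + (7 - PySem.Int.mod ((sbN : Nat) : Int) 8) + ((i : Nat) : Int)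
        let byte_index := PySem.Int.floordiv bit_index 8
        let bit_in_byte := PySem.Int.mod bit_index 8
        let bit_value := PySem.Int.band (PySem.List.pyGetD db byte_index 0 >>> ((7 - bit_in_byte).toNat : Nat)) 1
        PySem.Int.bor (extracted_value <<< (1 : Nat)) bit_value) 0
      = (((List.range m).foldl (fun acc i => 2 * acc + pvBit (pvBytes db) (8 * (sbN / 8) + (7 - sbN % 8) + i)) 0 : Nat) : Int) := by
  intro m
  induction m with
  | zero => intro _; simp
  | succ m ih =>
    intro hm
    rw [List.range_succ, List.foldl_append, ih (by omega)]
    have hr : (List.range m ++ [m]).foldl (fun acc i => 2 * acc + pvBit (pvBytes db) (8 * (sbN / 8) + (7 - sbN % 8) + i)) 0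
        = 2 * ((List.range m).foldl (fun acc i => 2 * acc + pvBit (pvBytes db) (8 * (sbN / 8) + (7 - sbN % 8) + i)) 0)
          + pvBit (pvBytes db) (8 * (sbN / 8) + (7 - sbN % 8) + m) := by
      rw [List.foldl_append]
      rfl
    rw [hr, List.foldl_cons, List.foldl_nil]
    dsimp only
    have hS : (8 * PySem.Int.floordiv ((sbN:Nat):Int) 8 + (7 - PySem.Int.mod ((sbN:Nat):Int) 8) + (m:Int))
        = (((8 * (sbN / 8) + (7 - sbN % 8) + m : Nat)) : Int) := by
      have h1 : PySem.Int.floordiv ((sbN:Nat):Int) 8 = ((sbN / 8 : Nat) : Int) := by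
        exact_mod_cast PySem.Int.floordiv_natCast sbN 8
      have h2 : PySem.Int.mod ((sbN:Nat):Int) 8 = ((sbN % 8 : Nat) : Int) := by
        exact_mod_cast PySem.Int.mod_natCast sbN 8
      have h3 : sbN % 8 < 8 := Nat.mod_lt _ (by norm_num)
      rw [h1, h2]
      push_cast
      omega
    rw [hS]
    exact pv_bigA_step db _ _ (by omega)

lemma pv_signBlock (w L : Nat) (sg : Bool) (hw : w < 2 ^ L) :
    (if sg && decide (0 < ((L : Nat) : Int)) then
        if PySem.Int.band ((w : Nat) : Int) ((1 : Int) <<< ((((L : Nat) : Int) - 1).toNat : Nat)) ≠ 0 then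
          ((w : Nat) : Int) - (1 : Int) <<< ((((L : Nat) : Int).toNat : Nat))
        else ((w : Nat) : Int)
      else ((w : Nat) : Int))
      = if sg && decide (0 < ((L : Nat) : Int)) && decide (((w : Nat) : Int) >>> ((((L : Nat) : Int) - 1).toNat : Nat) ≠ 0) then
          ((w : Nat) : Int) - (1 : Int) <<< ((((L : Nat) : Int).toNat : Nat))
        else ((w : Nat) : Int) := by
  cases sg with
  | false => simp
  | true =>
    by_cases hL : 0 < L
    · have hd : (0:Int) < ((L : Nat) : Int) := by exact_mod_cast hL
      have ht : ((((L : Nat) : Int) - 1).toNat : Nat) = L - 1 := by omega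
      rw [ht]
      by_cases hc : PySem.Int.band ((w : Nat) : Int) ((1 : Int) <<< ((L - 1 : Nat) : Nat)) ≠ 0
      · have hc2 : (((w : Nat) : Int) >>> ((L - 1 : Nat) : Nat)) ≠ 0 := (pv_signTest w L hw hL).mp hc
        simp [hc, hc2]
      · have hc2 : ¬ (((w : Nat) : Int) >>> ((L - 1 : Nat) : Nat)) ≠ 0 :=
          fun h => hc ((pv_signTest w L hw hL).mpr h)
        simp [hc, hc2]
    · simp [hL]

-- ===== VERDICT (by name: the statement is the Claim_ definition above) =====
theorem extract_signal_value_spec : Claim_equal_extract_signal_value := by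
  unfold Claim_equal_extract_signal_value
  intro db sb len be sg snl fil hDom hPre
  obtain ⟨hsb, hlen, hbig⟩ := hPre
  unfold Spec_extract_signal_value
  obtain ⟨sbN, rfl⟩ : ∃ u : Nat, sb = (u : Int) := ⟨sb.toNat, by omega⟩
  obtain ⟨L, rfl⟩ : ∃ u : Nat, len = (u : Int) := ⟨len.toNat, by omega⟩
  have h1 : PySem.Int.floordiv ((sbN : Nat) : Int) 8 = ((sbN / 8 : Nat) : Int) := by
    exact_mod_cast PySem.Int.floordiv_natCast sbN 8
  have h2 : PySem.Int.mod ((sbN : Nat) : Int) 8 = ((sbN % 8 : Nat) : Int) := by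
    exact_mod_cast PySem.Int.mod_natCast sbN 8
  have h3 : sbN % 8 < 8 := Nat.mod_lt _ (by norm_num)
  have hfsl : (pvBytes db).length = db.length := by simp [pvBytes]
  have hfb := pv_bytes_lt db
  unfold extract_signal_value extract_signal_value_alt
  cases be with
  | false =>
    simp only [Bool.false_eq_true, if_false]
    have hW : (PySem.List.enumerate db 0).foldl
        (fun raw p => PySem.Int.bor raw (PySem.Int.band p.2 255 <<< ((8 * p.1).toNat : Nat))) (0 : Int)
        = ((pvLE (pvBytes db) : Nat) : Int) := by
      have := pv_littleA db 0 0 (by norm_num)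
      simpa using this
    rw [hW, pv_leB db]
    have htn : (((sbN : Nat) : Int).toNat : Nat) = sbN := by omega
    rw [htn]
    have hw : pvLE (pvBytes db) / 2 ^ sbN % 2 ^ L < 2 ^ L := Nat.mod_lt _ (by positivity)
    have hLn : (((L : Nat) : Int).toNat : Nat) = L := by omega
    rw [hLn, pv_maskShift (pvLE (pvBytes db)) sbN L]
    exact pv_signBlock _ L sg hw
  | true =>
    simp only [if_true]
    have hmInt := hbig rfl
    rw [h1, h2] at hmInt
    have hm' : 8 * (sbN / 8) + (7 - sbN % 8) + L ≤ 8 * db.length := by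
      push_cast at hmInt
      omega
    -- A side
    rw [PySem.List.pyRange_zero_natCast L, List.foldl_map]
    rw [pv_bigA db sbN L hm']
    rw [pv_bigLoop (pvBytes db) (8 * (sbN / 8) + (7 - sbN % 8)) hfb L (by rw [hfsl]; omega)]
    -- B side
    have hmsb : 8 * PySem.Int.floordiv ((sbN : Nat) : Int) 8 + 7 - PySem.Int.mod ((sbN : Nat) : Int) 8
        = (((8 * (sbN / 8) + (7 - sbN % 8) : Nat)) : Int) := by
      rw [h1, h2]; push_cast; omega
    rw [hmsb, pv_beB db]
    have hshift : ((8 * ((db.map (fun b => PySem.Int.band b 255)).length : Int)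
        - ((8 * (sbN / 8) + (7 - sbN % 8) : Nat) : Int) - ((L : Nat) : Int)).toNat : Nat)
        = 8 * db.length - ((8 * (sbN / 8) + (7 - sbN % 8)) + L) := by
      rw [List.length_map]
      omega
    rw [hshift]
    have hLn : (((L : Nat) : Int).toNat : Nat) = L := by omega
    rw [hLn, pv_maskShift (pvBE (pvBytes db)) _ L, hfsl]
    have hw : pvBE (pvBytes db) / 2 ^ (8 * db.length - (8 * (sbN / 8) + (7 - sbN % 8) + L)) % 2 ^ L < 2 ^ L :=
      Nat.mod_lt _ (by positivity)
    exact pv_signBlock _ L sg hw
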